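-- pv_equiv track=rewrite | github.com/derkaal/europeanconsortium | src/consortium/utils/chapter_organizer.py | get_chapter_summary
-- ===== SOURCE A (Python) =====
-- from typing import Dict, List, Any, Tuple
--
-- def get_chapter_summary(chapter: Dict[str, Any]) -> str:
--     """
--     Generate a summary statement for a chapter.
--
--     Args:
--         chapter: Chapter dictionary
--
--     Returns:
--         Summary string
--     """
--     # Count ratings
--     ratings = [response.get('rating', 'ACCEPT')
--               for _, response in chapter['agents']]
--
--     has_blocks = 'BLOCK' in ratings
--     has_warns = 'WARN' in ratings
--     has_endorses = 'ENDORSE' in ratings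
--
--     if has_blocks:
--         return f"This area presents critical concerns that must be addressed before proceeding."
--     elif has_warns:
--         return f"This area requires careful consideration and mitigation planning."
--     elif has_endorses:
--         return f"This area presents strategic opportunities and aligns well with European values."
--     else:
--         return f"This area is generally acceptable with standard implementation practices."
-- ===== SOURCE B (Python) =====
-- def get_chapter_summary(chapter):
--     """
--     Generate a summary statement for a chapter.
--
--     Single pass: keep the worst (highest-priority) rating seen, then look the
--     summary up in a table.
--     """
--     PRIORITY = {'BLOCK': 3, 'WARN': 2, 'ENDORSE': 1}
--     worst = 0
--     for _, response in chapter['agents']: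
--         worst = max(worst, PRIORITY.get(response.get('rating', 'ACCEPT'), 0))
--     SUMMARIES = [
--         "This area is generally acceptable with standard implementation practices.",
--         "This area presents strategic opportunities and aligns well with European values.",
--         "This area requires careful consideration and mitigation planning.",
--         "This area presents critical concerns that must be addressed before proceeding.",
--     ]
--     return SUMMARIES[worst]
-- ===== Notes on version B (the rewrite author's own statement) =====
-- stated objective: alternative
-- what changed: Replaces the ratings list plus three independent membership scans and an if/elif cascade with a single accumulating pass that keeps the maximum rating priority, followed by a table lookup of the summary.
import Mathlib
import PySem

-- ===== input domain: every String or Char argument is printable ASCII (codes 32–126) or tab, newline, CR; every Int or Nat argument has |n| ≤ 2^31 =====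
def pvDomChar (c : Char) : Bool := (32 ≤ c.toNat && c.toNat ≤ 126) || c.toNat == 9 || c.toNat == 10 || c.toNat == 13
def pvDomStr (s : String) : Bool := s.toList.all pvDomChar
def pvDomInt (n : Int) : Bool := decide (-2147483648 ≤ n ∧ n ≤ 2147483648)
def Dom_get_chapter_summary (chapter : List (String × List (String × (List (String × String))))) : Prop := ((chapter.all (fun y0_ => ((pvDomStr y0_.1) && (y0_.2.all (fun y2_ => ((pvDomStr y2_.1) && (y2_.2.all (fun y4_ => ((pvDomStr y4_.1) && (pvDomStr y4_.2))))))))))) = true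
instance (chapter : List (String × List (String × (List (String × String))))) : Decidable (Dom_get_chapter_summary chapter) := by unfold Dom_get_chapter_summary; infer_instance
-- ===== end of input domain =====

-- B replaces A's ratings list + three membership scans + if/elif cascade by one
-- accumulating max-priority pass and a table lookup (alternative decomposition).

-- ===== PORT A =====
-- response.get('rating', 'ACCEPT'): first-match association-list lookup with default
def pvRatingOf (response : List (String × String)) : String :=
  (List.lookup "rating" response).getD "ACCEPT"

def get_chapter_summary (chapter : List (String × List (String × (List (String × String))))) : String :=
  let agents := (List.lookup "agents" chapter).getD []   -- chapter['agents']; Pre_ excludes the KeyError case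
  let ratings := agents.map (fun p => pvRatingOf p.2)
  if ratings.contains "BLOCK" then
    "This area presents critical concerns that must be addressed before proceeding."
  else if ratings.contains "WARN" then
    "This area requires careful consideration and mitigation planning."
  else if ratings.contains "ENDORSE" then
    "This area presents strategic opportunities and aligns well with European values."
  else
    "This area is generally acceptable with standard implementation practices."

-- ===== PORT B =====
-- PRIORITY.get(r, 0)
def pvPriority (r : String) : Nat :=
  (List.lookup r [("BLOCK", 3), ("WARN", 2), ("ENDORSE", 1)]).getD 0

def pvSummaries : List String :=
  [ "This area is generally acceptable with standard implementation practices.",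
    "This area presents strategic opportunities and aligns well with European values.",
    "This area requires careful consideration and mitigation planning.",
    "This area presents critical concerns that must be addressed before proceeding." ]

def get_chapter_summary_alt (chapter : List (String × List (String × (List (String × String))))) : String :=
  let agents := (List.lookup "agents" chapter).getD []   -- chapter['agents']; Pre_ excludes the KeyError case
  let worst := agents.foldl (fun w p => max w (pvPriority ((List.lookup "rating" p.2).getD "ACCEPT"))) 0
  pvSummaries.getD worst ""   -- SUMMARIES[worst]; worst is always in range 0..3

-- ===== PRECONDITION & SPEC =====
-- A raises KeyError when the chapter has no 'agents' key; Pre_ excludes exactly those inputs.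
def Pre_get_chapter_summary (chapter : List (String × List (String × (List (String × String))))) : Prop :=
  "agents" ∈ chapter.map Prod.fst

instance (chapter : List (String × List (String × (List (String × String))))) : Decidable (Pre_get_chapter_summary chapter) := by unfold Pre_get_chapter_summary; infer_instance

def pvWitness_get_chapter_summary : (List (String × List (String × (List (String × String))))) :=
  [("agents", [("agent_a", [("rating", "WARN")]), ("agent_b", [])])]

def Spec_get_chapter_summary (chapter : List (String × List (String × (List (String × String))))) (out : String) : Prop := out = get_chapter_summary_alt chapter
instance (chapter : List (String × List (String × (List (String × String))))) (out : String) : Decidable (Spec_get_chapter_summary chapter out) := by unfold Spec_get_chapter_summary; infer_instance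

-- ===== CLAIM (what is proved, stated in full; the proofs are below) =====
def Claim_equal_get_chapter_summary : Prop := ∀ (chapter : List (String × List (String × (List (String × String))))), Dom_get_chapter_summary chapter → Pre_get_chapter_summary chapter → Spec_get_chapter_summary chapter (get_chapter_summary chapter)

-- ===== LEMMAS AND PROOFS =====

-- fold out the accumulator of B's max-fold
theorem pv_foldl_max (rs : List String) (acc : Nat) :
    rs.foldl (fun w r => max w (pvPriority r)) acc
      = max acc (rs.foldl (fun w r => max w (pvPriority r)) 0) := by
  induction rs generalizing acc with
  | nil => simp
  | cons r rs ih =>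
    simp only [List.foldl_cons]
    rw [ih (max acc (pvPriority r)), ih (max 0 (pvPriority r))]
    omega

-- the accumulated worst priority, characterised by the three membership tests A makes
theorem pv_worst_char (rs : List String) :
    rs.foldl (fun w r => max w (pvPriority r)) 0
      = (if rs.contains "BLOCK" then 3
         else if rs.contains "WARN" then 2
         else if rs.contains "ENDORSE" then 1 else 0) := by
  induction rs with
  | nil => simp
  | cons r rs ih =>
    simp only [List.foldl_cons, List.contains_cons]
    rw [pv_foldl_max, ih]
    by_cases hb : r = "BLOCK"
    · subst hb; simp [pvPriority, List.lookup]; split_ifs <;> omega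
    · by_cases hw : r = "WARN"
      · subst hw; simp [pvPriority, List.lookup]; split_ifs <;> omega
      · by_cases he : r = "ENDORSE"
        · subst he; simp [pvPriority, List.lookup]; split_ifs <;> omega
        · have hb2 : (r == "BLOCK") = false := beq_eq_false_iff_ne.mpr hb
          have hw2 : (r == "WARN") = false := beq_eq_false_iff_ne.mpr hw
          have he2 : (r == "ENDORSE") = false := beq_eq_false_iff_ne.mpr he
          have hp : pvPriority r = 0 := by
            simp [pvPriority, List.lookup, hb2, hw2, he2]
          rw [hp]
          have h1 : ("BLOCK" = r) = False := eq_false (fun h => hb h.symm)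
          have h2 : ("WARN" = r) = False := eq_false (fun h => hw h.symm)
          have h3 : ("ENDORSE" = r) = False := eq_false (fun h => he h.symm)
          simp [h1, h2, h3]

theorem get_chapter_summary_eq (chapter : List (String × List (String × (List (String × String))))) :
    get_chapter_summary chapter = get_chapter_summary_alt chapter := by
  unfold get_chapter_summary get_chapter_summary_alt
  dsimp only
  have hmap : ((List.lookup "agents" chapter).getD []).foldl
      (fun w p => max w (pvPriority ((List.lookup "rating" p.2).getD "ACCEPT"))) 0
      = (((List.lookup "agents" chapter).getD []).map (fun p => pvRatingOf p.2)).foldl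
          (fun w r => max w (pvPriority r)) 0 := by
    rw [List.foldl_map]; rfl
  rw [hmap, pv_worst_char]
  split_ifs <;> rfl

-- ===== VERDICT (by name: the statement is the Claim_ definition above) =====
theorem get_chapter_summary_spec : Claim_equal_get_chapter_summary := by
  intro chapter _ _
  exact get_chapter_summary_eq chapter
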